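-- pv_equiv track=rewrite | github.com/jenil2803/Agentic_bug_hunter | code/vedant/code_parser.py | identify_rdi_block
-- ===== SOURCE A (Python) =====
-- from typing import List, Dict, Tuple
--
-- def identify_rdi_block(code: str) -> Tuple[int, int]:
--     """
--     Identify RDI_BEGIN() and RDI_END() block boundaries
--
--     Returns:
--         Tuple of (start_line, end_line) or (-1, -1) if not found
--     """
--     lines = code.split('\n')
--     start_line = -1
--     end_line = -1
--
--     for idx, line in enumerate(lines, 1):
--         if 'RDI_BEGIN' in line and start_line == -1:
--             start_line = idx
--         if 'RDI_END' in line and end_line == -1: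
--             end_line = idx
--
--     return (start_line, end_line)
-- ===== SOURCE B (Python) =====
-- def identify_rdi_block(code: str) -> tuple:
--     """Idiomatic rewrite: each marker found by its own scan with next()."""
--     lines = code.split('\n')
--     start_line = next((i for i, line in enumerate(lines, 1) if 'RDI_BEGIN' in line), -1)
--     end_line = next((i for i, line in enumerate(lines, 1) if 'RDI_END' in line), -1)
--     return (start_line, end_line)
-- ===== Notes on version B (the rewrite author's own statement) =====
-- stated objective: idiomatic
-- what changed: Replaced the single interleaved loop carrying two not-yet-found flags by two independent first-match scans, each with its own early exit via next() with a default.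
import Mathlib
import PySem

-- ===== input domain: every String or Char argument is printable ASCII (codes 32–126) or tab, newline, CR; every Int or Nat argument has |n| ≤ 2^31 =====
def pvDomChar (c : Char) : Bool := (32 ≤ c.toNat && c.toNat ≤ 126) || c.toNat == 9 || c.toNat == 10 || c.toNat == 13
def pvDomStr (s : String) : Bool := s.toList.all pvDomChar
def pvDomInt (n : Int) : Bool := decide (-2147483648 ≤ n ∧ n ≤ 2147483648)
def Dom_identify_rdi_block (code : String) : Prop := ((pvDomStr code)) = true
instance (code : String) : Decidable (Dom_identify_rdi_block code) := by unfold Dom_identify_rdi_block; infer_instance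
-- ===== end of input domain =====

-- B changes the decomposition only (two independent first-match scans instead of one
-- interleaved loop); same return value, same O(n) cost.

-- ===== PORT A =====
-- one pass over enumerate(lines, 1), carrying (start_line, end_line), each updated only while still -1
def identify_rdi_block (code : String) : Int × Int :=
  let lines := (PySem.Str.split? code "\n").getD []
  let st := (PySem.List.enumerate lines 1).foldl
    (fun (acc : Int × Int) (p : Int × String) =>
      let s := if PySem.Str.isIn "RDI_BEGIN" p.2 && acc.1 == -1 then p.1 else acc.1
      let e := if PySem.Str.isIn "RDI_END" p.2 && acc.2 == -1 then p.1 else acc.2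
      (s, e))
    ((-1 : Int), (-1 : Int))
  st

-- ===== PORT B =====
-- next((i for i, line in enumerate(lines, 1) if sub in line), -1): its own scan per marker
def firstLineWith (sub : String) : List String → Int → Int
  | [], _ => -1
  | l :: rest, i => if PySem.Str.isIn sub l then i else firstLineWith sub rest (i + 1)

def identify_rdi_block_alt (code : String) : Int × Int :=
  let lines := (PySem.Str.split? code "\n").getD []
  (firstLineWith "RDI_BEGIN" lines 1, firstLineWith "RDI_END" lines 1)

-- ===== PRECONDITION & SPEC =====
def Spec_identify_rdi_block (code : String) (out : Int × Int) : Prop := out = identify_rdi_block_alt code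
instance (code : String) (out : Int × Int) : Decidable (Spec_identify_rdi_block code out) := by unfold Spec_identify_rdi_block; infer_instance

-- ===== CLAIM (what is proved, stated in full; the proofs are below) =====
def Claim_equal_identify_rdi_block : Prop := ∀ (code : String), Dom_identify_rdi_block code → Spec_identify_rdi_block code (identify_rdi_block code)

-- ===== LEMMAS AND PROOFS =====

-- A's loop keeps a component once it is non-(-1); while a component is -1 it takes the first match,
-- which is exactly B's per-marker scan.
theorem foldl_eq_firstLineWith (lines : List String) (i : Int) (hi : 0 < i) (s e : Int) :
    (PySem.List.enumerate lines i).foldl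
      (fun (acc : Int × Int) (p : Int × String) =>
        let s := if PySem.Str.isIn "RDI_BEGIN" p.2 && acc.1 == -1 then p.1 else acc.1
        let e := if PySem.Str.isIn "RDI_END" p.2 && acc.2 == -1 then p.1 else acc.2
        (s, e))
      (s, e)
    = ((if s = -1 then firstLineWith "RDI_BEGIN" lines i else s),
       (if e = -1 then firstLineWith "RDI_END" lines i else e)) := by
  induction lines generalizing i s e with
  | nil => simp [PySem.List.enumerate_nil, firstLineWith]
  | cons l rest ih =>
    have hne : ¬ i = -1 := by omega
    simp only [PySem.List.enumerate_cons, List.foldl_cons, firstLineWith]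
    rw [ih _ (by omega)]
    by_cases hb : PySem.Chars.isIn ['R','D','I','_','B','E','G','I','N'] l.toList = true <;>
      by_cases he : PySem.Chars.isIn ['R','D','I','_','E','N','D'] l.toList = true <;>
        by_cases hs : s = -1 <;>
          by_cases hse : e = -1 <;>
            simp [hb, he, hs, hse, hne]

-- ===== VERDICT (by name: the statement is the Claim_ definition above) =====
theorem identify_rdi_block_spec : Claim_equal_identify_rdi_block := by
  intro code _
  unfold Spec_identify_rdi_block identify_rdi_block identify_rdi_block_alt
  simp only [foldl_eq_firstLineWith _ 1 one_pos]
  simp
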